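-- pv_equiv track=rewrite | github.com/Santihago/decisions | tokentools.py | left_right_switch
-- ===== SOURCE A (Python) =====
-- def left_right_switch(text_sequence):
--     """A function to invert to make the right left and the left right.
--     :params str text_sequence: a sequence in text, can be letters or digits
--     """
--     codes=[]
--     # Check if digits or letters
--     if text_sequence.isdigit():
--         codes = [['1', '_'], ['2', '1'], ['_', '2']]  # 3 steps with placeholder as a little hack
--
--     elif text_sequence.isalpha():
--         codes = [['l', '_'], ['r', 'l'], ['_', 'r']]
--
--     for x,y in (codes):
--         text_sequence = text_sequence.replace(x, y)
--
--     return text_sequence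
-- ===== SOURCE B (Python) =====
-- def left_right_switch(text_sequence):
--     """Swap left/right markers in one explicit per-character pass via a lookup dict."""
--     if text_sequence.isdigit():
--         mapping = {'1': '2', '2': '1'}
--     elif text_sequence.isalpha():
--         mapping = {'l': 'r', 'r': 'l'}
--     else:
--         mapping = {}
--     out = []
--     for ch in text_sequence:
--         out.append(mapping.get(ch, ch))
--     return ''.join(out)
-- ===== Notes on version B (the rewrite author's own statement) =====
-- stated objective: simpler
-- what changed: Replaces the three sequential str.replace scans with a placeholder hack by one explicit per-character loop through a small swap dict built per branch.
import Mathlib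
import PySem

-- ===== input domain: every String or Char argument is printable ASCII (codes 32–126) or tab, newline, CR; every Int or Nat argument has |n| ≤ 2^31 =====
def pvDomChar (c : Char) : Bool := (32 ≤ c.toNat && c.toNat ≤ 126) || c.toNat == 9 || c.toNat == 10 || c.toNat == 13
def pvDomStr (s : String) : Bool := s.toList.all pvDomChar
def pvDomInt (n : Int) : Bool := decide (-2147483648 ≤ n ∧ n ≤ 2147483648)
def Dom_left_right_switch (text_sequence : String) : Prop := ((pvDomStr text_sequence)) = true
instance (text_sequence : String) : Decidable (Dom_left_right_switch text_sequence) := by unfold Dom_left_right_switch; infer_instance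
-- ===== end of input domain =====

-- B swaps the marker characters in one explicit per-character pass over a small
-- lookup dict instead of A's three sequential str.replace scans with a placeholder.

-- ===== PORT A =====
def left_right_switch (text_sequence : String) : String :=
  let codes : List (String × String) :=
    if PySem.Str.strIsdigit text_sequence then [("1", "_"), ("2", "1"), ("_", "2")]
    else if PySem.Str.strIsalpha text_sequence then [("l", "_"), ("r", "l"), ("_", "r")]
    else []
  codes.foldl (fun t p => PySem.Str.replace t p.1 p.2) text_sequence

-- ===== PORT B =====
def left_right_switch_alt (text_sequence : String) : String :=
  let mapping : PySem.Dict Char Char :=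
    if PySem.Str.strIsdigit text_sequence then PySem.Dict.ofList [('1', '2'), ('2', '1')]
    else if PySem.Str.strIsalpha text_sequence then PySem.Dict.ofList [('l', 'r'), ('r', 'l')]
    else PySem.Dict.empty
  let out : List Char :=
    text_sequence.toList.foldl (fun acc ch => acc ++ [mapping.getD ch ch]) []
  String.ofList (PySem.Chars.join [] (out.map (fun c => [c])))

-- ===== PRECONDITION & SPEC =====
def Spec_left_right_switch (text_sequence : String) (out : String) : Prop := out = left_right_switch_alt text_sequence
instance (text_sequence : String) (out : String) : Decidable (Spec_left_right_switch text_sequence out) := by unfold Spec_left_right_switch; infer_instance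

-- ===== CLAIM (what is proved, stated in full; the proofs are below) =====
def Claim_equal_left_right_switch : Prop := ∀ (text_sequence : String), Dom_left_right_switch text_sequence → Spec_left_right_switch text_sequence (left_right_switch text_sequence)

-- ===== LEMMAS AND PROOFS =====

-- replacing a single character is a per-character map
theorem replace_go_single (x y : Char) :
    ∀ (fuel : Nat) (l acc : List Char), l.length ≤ fuel →
      PySem.Chars.replace.go [x] [y] fuel l acc
        = acc.reverse ++ l.map (fun c => if c = x then y else c) := by
  intro fuel
  induction fuel with
  | zero =>
    intro l acc h
    have : l = [] := List.eq_nil_of_length_eq_zero (Nat.le_zero.mp h)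
    subst this
    simp [PySem.Chars.replace.go]
  | succ n ih =>
    intro l acc h
    cases l with
    | nil => simp [PySem.Chars.replace.go]
    | cons c t =>
      by_cases hc : c = x
      · subst hc
        have hp : List.isPrefixOf [c] (c :: t) = true := by
          simp [List.isPrefixOf]
        rw [PySem.Chars.replace.go]
        simp only [hp, if_true]
        have := ih t (y :: acc) (by simpa using Nat.le_of_succ_le_succ h)
        simpa [List.reverse_cons] using this
      · have hp : List.isPrefixOf [x] (c :: t) = false := by
          simp [List.isPrefixOf]
          intro hcx; exact hc hcx.symm
        rw [PySem.Chars.replace.go]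
        simp only [hp]
        have := ih t (c :: acc) (by simpa using Nat.le_of_succ_le_succ h)
        simp only [this, List.reverse_cons, List.map_cons]
        simp [hc]

theorem replace_single (cs : List Char) (x y : Char) :
    PySem.Chars.replace cs [x] [y] = cs.map (fun c => if c = x then y else c) := by
  rw [PySem.Chars.replace]
  simp only [List.isEmpty_cons, Bool.false_eq_true, if_false]
  simpa using replace_go_single x y cs.length cs [] (le_refl _)

theorem str_toList_inj (a b : String) (h : a.toList = b.toList) : a = b := by
  have := congrArg String.ofList h
  simpa using this

theorem getD_pair_dict (a b c d z : Char)
    (hitems : (PySem.Dict.ofList [(a, b), (c, d)]).items = [(a, b), (c, d)]) :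
    (PySem.Dict.ofList [(a, b), (c, d)]).getD z z
      = if z = a then b else if z = c then d else z := by
  have ha : (a == z) = decide (z = a) := by
    by_cases h : z = a
    · simp [h]
    · simp [h]; intro hh; exact h hh.symm
  have hc2 : (c == z) = decide (z = c) := by
    by_cases h : z = c
    · simp [h]
    · simp [h]; intro hh; exact h hh.symm
  simp only [PySem.Dict.getD, PySem.Dict.get?, hitems, List.find?, ha, hc2]
  by_cases h1 : z = a
  · simp [h1]
  · by_cases h2 : z = c
    · subst h2; simp [h1]
    · simp [h1, h2]


theorem alt_eq_map (s : String) (m : PySem.Dict Char Char) :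
    String.ofList (PySem.Chars.join []
      ((s.toList.foldl (fun acc ch => acc ++ [m.getD ch ch]) []).map (fun c => [c])))
      = String.ofList (s.toList.map (fun ch => m.getD ch ch)) := by
  rw [PySem.List.foldl_append_singleton_eq_map]
  rw [PySem.Chars.join_nil_singletons]
  simp

theorem left_right_switch_spec : Claim_equal_left_right_switch := by
  unfold Claim_equal_left_right_switch
  intro s _
  unfold Spec_left_right_switch left_right_switch left_right_switch_alt
  by_cases hd : PySem.Str.strIsdigit s = true
  · simp only [hd, if_true, List.foldl]
    rw [alt_eq_map]
    have hall : ∀ c ∈ s.toList, PySem.Chars.isdigit c = true := by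
      have := hd
      rw [PySem.Str.strIsdigit_eq] at this
      unfold PySem.Chars.strIsdigit at this
      simp only [Bool.and_eq_true, List.all_eq_true] at this
      exact fun c hc => this.2 c hc
    apply str_toList_inj
    rw [String.toList_ofList]
    simp only [PySem.Str.toList_replace,
      show ("1" : String).toList = ['1'] from rfl, show ("2" : String).toList = ['2'] from rfl,
      show ("_" : String).toList = ['_'] from rfl]
    rw [replace_single, replace_single, replace_single]
    simp only [List.map_map]
    apply List.map_congr_left
    intro c hc
    have hdc := hall c hc
    have hne : c ≠ '_' := by
      intro h; subst h; simp [PySem.Chars.isdigit] at hdc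
    rw [getD_pair_dict _ _ _ _ _ (by decide)]
    by_cases h1 : c = '1'
    · subst h1; simp
    · by_cases h2 : c = '2'
      · subst h2; simp
      · simp [Function.comp, h1, h2, hne]
  · by_cases ha : PySem.Str.strIsalpha s = true
    · simp only [hd, ha, Bool.false_eq_true, if_false, if_true, List.foldl]
      rw [alt_eq_map]
      have hall : ∀ c ∈ s.toList, PySem.Chars.isalpha c = true := by
        have := ha
        rw [PySem.Str.strIsalpha_eq] at this
        unfold PySem.Chars.strIsalpha at this
        simp only [Bool.and_eq_true, List.all_eq_true] at this
        exact fun c hc => this.2 c hc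
      apply str_toList_inj
      rw [String.toList_ofList]
      simp only [PySem.Str.toList_replace,
        show ("l" : String).toList = ['l'] from rfl, show ("r" : String).toList = ['r'] from rfl,
        show ("_" : String).toList = ['_'] from rfl]
      rw [replace_single, replace_single, replace_single]
      simp only [List.map_map]
      apply List.map_congr_left
      intro c hc
      have hac := hall c hc
      have hne : c ≠ '_' := by
        intro h; subst h; exact absurd hac (by decide)
      rw [getD_pair_dict _ _ _ _ _ (by decide)]
      by_cases h1 : c = 'l'
      · subst h1; simp
      · by_cases h2 : c = 'r'
        · subst h2; simp
        · simp [Function.comp, h1, h2, hne]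
    · simp only [hd, ha, Bool.false_eq_true, if_false, List.foldl]
      rw [alt_eq_map]
      simp only [PySem.Dict.getD, PySem.Dict.get?]
      apply str_toList_inj
      rw [String.toList_ofList]
      simp [PySem.Dict.empty]
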